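-- pv_equiv track=rewrite | github.com/Iris-ZJ-12/NLP | pharm_ai/papa/extractors.py | find_inid_code_and_merge
-- ===== SOURCE A (Python) =====
-- def find_inid_code_and_merge(target_text):
--     codes = []
--     target_text_merged = []
--     curr = ''
--     for piece in target_text:
--         for code in ['60', '62']:
--             if piece.startswith(code):
--                 if curr:
--                     target_text_merged.append(curr + '.')
--                 curr = piece
--                 codes.append(code)
--                 break
--         else:
--             curr += '.' + piece
--     target_text_merged.append(curr + '.')
--     if len(codes) == 0 and len(target_text_merged) == 1:
--         codes = ['']
--     if len(codes) == len(target_text_merged):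
--         res = [{'inid_code': codes[i], 'paragraph': target_text_merged[i]} for i in range(len(codes))]
--     else:
--         raise ValueError(f'Something wrong with target text extraction, length of inid \
--             codes {len(codes)}, length of target text {len(target_text_merged)}')
--     return res
-- ===== SOURCE B (Python) =====
-- def find_inid_code_and_merge(target_text):
--     # Group pieces into segments: each piece starting with an inid code opens a
--     # new group; other pieces join the current group (a code-less leading group
--     # if none is open yet).
--     groups = []  # list of (code or None, [pieces])
--     for piece in target_text:
--         code = next((c for c in ('60', '62') if piece.startswith(c)), None)
--         if code is not None:
--             groups.append((code, [piece]))
--         elif groups: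
--             groups[-1][1].append(piece)
--         else:
--             groups.append((None, [piece]))
--     if not groups:
--         groups = [(None, [])]
--     result = []
--     for code, pieces in groups:
--         if code is None:
--             paragraph = ''.join('.' + p for p in pieces) + '.'
--         else:
--             paragraph = '.'.join(pieces) + '.'
--         result.append({'inid_code': code or '', 'paragraph': paragraph})
--     return result
-- ===== Notes on version B (the rewrite author's own statement) =====
-- stated objective: alternative
-- what changed: B first partitions the pieces into code-delimited groups (one pass building a list of (code, pieces) groups), then renders each group into its paragraph with a join, instead of A's single loop threading a running string accumulator and emitting paragraphs mid-loop.
import Mathlib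
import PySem

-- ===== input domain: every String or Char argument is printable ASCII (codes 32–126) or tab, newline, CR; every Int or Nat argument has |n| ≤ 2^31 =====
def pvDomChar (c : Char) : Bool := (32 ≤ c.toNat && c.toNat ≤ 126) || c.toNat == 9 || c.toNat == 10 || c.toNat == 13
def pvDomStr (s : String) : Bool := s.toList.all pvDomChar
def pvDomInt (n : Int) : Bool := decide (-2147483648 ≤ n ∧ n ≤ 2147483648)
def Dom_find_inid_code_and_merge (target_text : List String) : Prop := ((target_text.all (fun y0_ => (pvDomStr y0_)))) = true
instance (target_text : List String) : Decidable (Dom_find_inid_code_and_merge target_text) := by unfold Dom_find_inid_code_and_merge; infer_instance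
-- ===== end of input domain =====

-- B partitions the pieces into code-delimited groups in one pass and then renders each
-- group into its paragraph, instead of A's running string accumulator; objective: alternative decomposition (same cost).

-- ===== PORT A =====
-- loop state: (codes, (target_text_merged, curr))
def pvStepA (st : List String × List String × String) (piece : String) :
    List String × List String × String :=
  if PySem.Str.startswith piece "60" then
    (st.1 ++ ["60"], (if st.2.2 ≠ "" then st.2.1 ++ [st.2.2 ++ "."] else st.2.1), piece)
  else if PySem.Str.startswith piece "62" then
    (st.1 ++ ["62"], (if st.2.2 ≠ "" then st.2.1 ++ [st.2.2 ++ "."] else st.2.1), piece)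
  else
    (st.1, st.2.1, st.2.2 ++ "." ++ piece)

def find_inid_code_and_merge (target_text : List String) : List (List (String × String)) :=
  let st := target_text.foldl pvStepA ([], [], "")
  let merged := st.2.1 ++ [st.2.2 ++ "."]
  let codes := if st.1.length = 0 ∧ merged.length = 1 then [""] else st.1
  if codes.length = merged.length then
    (List.range codes.length).map (fun i =>
      [("inid_code", codes.getD i ""), ("paragraph", merged.getD i "")])
  else []  -- Python raises ValueError here; excluded by Pre_

-- ===== PORT B =====
def pvCode? (piece : String) : Option String :=
  if PySem.Str.startswith piece "60" then some "60"
  else if PySem.Str.startswith piece "62" then some "62"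
  else none

-- groups[-1][1].append(piece)
def pvAppendLast : List (Option String × List String) → String → List (Option String × List String)
  | [], p => [(none, [p])]
  | [g], p => [(g.1, g.2 ++ [p])]
  | g :: g' :: gs, p => g :: pvAppendLast (g' :: gs) p

def pvStepB (groups : List (Option String × List String)) (piece : String) :
    List (Option String × List String) :=
  match pvCode? piece with
  | some c => groups ++ [(some c, [piece])]
  | none =>
    match groups with
    | [] => [(none, [piece])]
    | _ :: _ => pvAppendLast groups piece

def pvEntry (g : Option String × List String) : List (String × String) :=
  let paragraph :=
    match g.1 with
    | none => PySem.Str.join "" (g.2.map (fun p => "." ++ p)) ++ "."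
    | some _ => PySem.Str.join "." g.2 ++ "."
  [("inid_code", g.1.getD ""), ("paragraph", paragraph)]

def find_inid_code_and_merge_alt (target_text : List String) : List (List (String × String)) :=
  let groups := target_text.foldl pvStepB []
  let groups := if groups = [] then [(none, [])] else groups
  groups.map pvEntry

-- ===== PRECONDITION & SPEC =====
def pvIsCode (p : String) : Bool :=
  PySem.Str.startswith p "60" || PySem.Str.startswith p "62"

-- Pre_ excludes exactly the inputs on which A raises its ValueError: a piece
-- starting with '60'/'62' occurring after a code-less leading piece.
def Pre_find_inid_code_and_merge (target_text : List String) : Prop :=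
  (∀ p ∈ target_text, pvIsCode p = false) ∨ pvIsCode (target_text.headD "") = true

instance (target_text : List String) : Decidable (Pre_find_inid_code_and_merge target_text) := by
  unfold Pre_find_inid_code_and_merge; infer_instance

def pvWitness_find_inid_code_and_merge : List String := ["60 A", "claim 1", "62 B"]

def Spec_find_inid_code_and_merge (target_text : List String) (out : List (List (String × String))) : Prop := out = find_inid_code_and_merge_alt target_text
instance (target_text : List String) (out : List (List (String × String))) : Decidable (Spec_find_inid_code_and_merge target_text out) := by unfold Spec_find_inid_code_and_merge; infer_instance

-- ===== CLAIM (what is proved, stated in full; the proofs are below) =====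
def Claim_equal_find_inid_code_and_merge : Prop := ∀ (target_text : List String), Dom_find_inid_code_and_merge target_text → Pre_find_inid_code_and_merge target_text → Spec_find_inid_code_and_merge target_text (find_inid_code_and_merge target_text)


-- ===== LEMMAS AND PROOFS =====

-- string basics
theorem pv_sjoin_nil (sep : String) : PySem.Str.join sep [] = "" := by
  apply String.toList_inj.mp; simp [pysem]

theorem pv_sjoin_singleton (sep a : String) : PySem.Str.join sep [a] = a := by
  apply String.toList_inj.mp; simp [pysem]

theorem pv_sjoin_cons_cons (sep a b : String) (l : List String) :
    PySem.Str.join sep (a::b::l) = a ++ sep ++ PySem.Str.join sep (b::l) := by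
  apply String.toList_inj.mp; simp [pysem, PySem.Chars.join_cons_cons]

theorem pv_dot_ne (s p : String) : s ++ "." ++ p ≠ "" := by
  intro h
  have := congrArg String.toList h
  simp [String.toList_append] at this

theorem pv_code_ne (p : String) (h : pvCode? p ≠ none) : p ≠ "" := by
  intro he; subst he; simp [pvCode?, pysem] at h

-- the merge function used by A's accumulator
def pvF (a p : String) : String := a ++ "." ++ p

theorem pvF_init (r : List String) (x y : String) :
    r.foldl pvF (x ++ y) = x ++ r.foldl pvF y := by
  induction r generalizing y with
  | nil => rfl
  | cons p r ih =>
    show r.foldl pvF (x ++ y ++ "." ++ p) = _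
    rw [String.append_assoc, String.append_assoc, ← String.append_assoc (s₁ := y)]
    exact ih (y ++ "." ++ p)

-- the paragraph text a group denotes (without the final '.')
def pvRaw : Option String × List String → String
  | (none, ps) => ps.foldl pvF ""
  | (some _, []) => ""
  | (some _, p :: rest) => rest.foldl pvF p

theorem pvRaw_append (g : Option String × List String) (p : String)
    (h : pvRaw g ≠ "") : pvRaw (g.1, g.2 ++ [p]) = pvRaw g ++ "." ++ p := by
  obtain ⟨c, ps⟩ := g
  cases c with
  | none => simp [pvRaw, List.foldl_append, pvF]
  | some c =>
    cases ps with
    | nil => simp [pvRaw] at h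
    | cons q rest => simp [pvRaw, List.foldl_append, pvF]

theorem pvAppendLast_concat (front : List (Option String × List String))
    (g : Option String × List String) (p : String) :
    pvAppendLast (front ++ [g]) p = front ++ [(g.1, g.2 ++ [p])] := by
  induction front with
  | nil => rfl
  | cons f front ih =>
    cases front with
    | nil => rfl
    | cons f' front' => simpa [pvAppendLast] using ih

-- abstraction of A's loop state from B's groups
def pvCodesOf (gs : List (Option String × List String)) : List String :=
  gs.filterMap Prod.fst
def pvMergedOf (gs : List (Option String × List String)) : List String :=
  gs.dropLast.map (fun g => pvRaw g ++ ".")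
def pvCurrOf (gs : List (Option String × List String)) : String :=
  (gs.getLast?.map pvRaw).getD ""

def pvRel (st : List String × List String × String)
    (gs : List (Option String × List String)) : Prop :=
  st = (pvCodesOf gs, pvMergedOf gs, pvCurrOf gs) ∧ ∀ g ∈ gs, pvRaw g ≠ ""

theorem pvStepB_none (gs : List (Option String × List String)) (p : String)
    (h : pvCode? p = none) (hgs : gs ≠ []) : pvStepB gs p = pvAppendLast gs p := by
  cases gs with
  | nil => exact absurd rfl hgs
  | cons a rest => simp [pvStepB, h]

theorem pv_concat_cases (gs : List (Option String × List String)) :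
    gs = [] ∨ ∃ l g, gs = l ++ [g] := by
  rcases List.eq_nil_or_concat gs with h | ⟨l, g, h⟩
  · exact Or.inl h
  · exact Or.inr ⟨l, g, by simpa [List.concat_eq_append] using h⟩

theorem pv_code_case (gs : List (Option String × List String)) (c p : String)
    (hp : p ≠ "") (hne : ∀ g ∈ gs, pvRaw g ≠ "") :
    pvRel (pvCodesOf gs ++ [c],
        (if pvCurrOf gs ≠ "" then pvMergedOf gs ++ [pvCurrOf gs ++ "."] else pvMergedOf gs),
        p) (gs ++ [(some c, [p])]) := by
  have hcodes : pvCodesOf (gs ++ [(some c, [p])]) = pvCodesOf gs ++ [c] := by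
    simp [pvCodesOf]
  have hmerged : pvMergedOf (gs ++ [(some c, [p])]) =
      (if pvCurrOf gs ≠ "" then pvMergedOf gs ++ [pvCurrOf gs ++ "."] else pvMergedOf gs) := by
    rcases pv_concat_cases gs with rfl | ⟨l, g, rfl⟩
    · simp [pvMergedOf, pvCurrOf]
    · have hg : pvRaw g ≠ "" := hne g (by simp)
      have hcur : pvCurrOf (l ++ [g]) = pvRaw g := by simp [pvCurrOf]
      simp [pvMergedOf, hcur, hg]
  have hcurr : pvCurrOf (gs ++ [(some c, [p])]) = p := by simp [pvCurrOf, pvRaw]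
  refine ⟨by rw [hcodes, hmerged, hcurr], ?_⟩
  intro g hg
  rcases List.mem_append.mp hg with h | h
  · exact hne g h
  · simp at h; subst h; simpa [pvRaw] using hp

theorem pvRel_step (st : List String × List String × String)
    (gs : List (Option String × List String)) (p : String)
    (h : pvRel st gs) : pvRel (pvStepA st p) (pvStepB gs p) := by
  obtain ⟨hst, hne⟩ := h
  subst hst
  have e60 : PySem.Str.startswith p "60" = PySem.Chars.startswith p.toList ['6', '0'] :=
    PySem.Str.startswith_eq p "60"
  have e62 : PySem.Str.startswith p "62" = PySem.Chars.startswith p.toList ['6', '2'] :=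
    PySem.Str.startswith_eq p "62"
  by_cases h60 : PySem.Chars.startswith p.toList ['6', '0'] = true
  · have hp : p ≠ "" := pv_code_ne p (by simp [pvCode?, h60])
    simpa only [pvStepA, pvStepB, pvCode?, e60, h60, if_true] using
      pv_code_case gs "60" p hp hne
  · by_cases h62 : PySem.Chars.startswith p.toList ['6', '2'] = true
    · have hp : p ≠ "" := pv_code_ne p (by simp [pvCode?, h60, h62])
      simpa only [pvStepA, pvStepB, pvCode?, e60, e62, h60, h62, if_true,
        Bool.false_eq_true, if_false] using pv_code_case gs "62" p hp hne
    · have hcn : pvCode? p = none := by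
        simp only [pvCode?, e60, e62, h60, h62, Bool.false_eq_true, if_false]
      rcases pv_concat_cases gs with rfl | ⟨l, g, rfl⟩
      · refine ⟨?_, ?_⟩
        · simp only [pvStepA, pvStepB, hcn, e60, e62, h60, h62, Bool.false_eq_true, if_false]
          simp [pvCodesOf, pvMergedOf, pvCurrOf, pvRaw, pvF]
        · intro g hg
          simp [pvStepB, hcn] at hg
          subst hg
          simpa [pvRaw, List.foldl, pvF] using pv_dot_ne "" p
      · have hg : pvRaw g ≠ "" := hne g (by simp)
        rw [pvStepB_none _ _ hcn (by simp), pvAppendLast_concat]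
        refine ⟨?_, ?_⟩
        · have hcur : pvCurrOf (l ++ [g]) = pvRaw g := by simp [pvCurrOf]
          have h1 : pvCodesOf (l ++ [(g.1, g.2 ++ [p])]) = pvCodesOf (l ++ [g]) := by
            cases hc : g.1 <;> simp [pvCodesOf, hc]
          have h2 : pvMergedOf (l ++ [(g.1, g.2 ++ [p])]) = pvMergedOf (l ++ [g]) := by
            simp [pvMergedOf]
          have h3 : pvCurrOf (l ++ [(g.1, g.2 ++ [p])]) = pvCurrOf (l ++ [g]) ++ "." ++ p := by
            simp only [pvCurrOf, List.getLast?_concat, Option.map_some, Option.getD_some]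
            exact (hcur ▸ pvRaw_append g p hg)
          simp only [pvStepA, e60, e62, h60, h62, Bool.false_eq_true, if_false, h1, h2, h3]
        · intro g' hg'
          rcases List.mem_append.mp hg' with h | h
          · exact hne g' (by simp [h])
          · simp at h; subst h
            rw [pvRaw_append g p hg]
            exact pv_dot_ne _ _

theorem pvRel_fold_aux (xs : List String) (st : List String × List String × String)
    (gs : List (Option String × List String)) (h : pvRel st gs) :
    pvRel (xs.foldl pvStepA st) (xs.foldl pvStepB gs) := by
  induction xs generalizing st gs with
  | nil => exact h
  | cons p xs ih => exact ih _ _ (pvRel_step st gs p h)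

theorem pvRel_fold (xs : List String) :
    pvRel (xs.foldl pvStepA ([], [], "")) (xs.foldl pvStepB []) :=
  pvRel_fold_aux xs _ _ ⟨rfl, by intro g hg; simp at hg⟩

theorem pv_none_para (ps : List String) (a : String) :
    ps.foldl pvF a = a ++ PySem.Str.join "" (ps.map (fun p => "." ++ p)) := by
  induction ps generalizing a with
  | nil => simp [pv_sjoin_nil]
  | cons p rest ih =>
    show rest.foldl pvF (a ++ "." ++ p) = _
    rw [ih]
    cases rest with
    | nil => simp [pv_sjoin_singleton, pv_sjoin_nil, String.append_assoc]
    | cons q rs =>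
      simp only [List.map_cons]
      rw [pv_sjoin_cons_cons]
      simp [String.append_assoc, String.append_empty]

theorem pv_some_para (q : String) (rest : List String) :
    rest.foldl pvF q = PySem.Str.join "." (q :: rest) := by
  induction rest generalizing q with
  | nil => simp [pv_sjoin_singleton]
  | cons r rs ih =>
    show rs.foldl pvF (q ++ "." ++ r) = _
    rw [pv_sjoin_cons_cons, ← ih r, pvF_init rs (q ++ ".") r, String.append_assoc]

theorem pvEntry_eq (g : Option String × List String) (h2 : pvRaw g ≠ "") :
    pvEntry g = [("inid_code", g.1.getD ""), ("paragraph", pvRaw g ++ ".")] := by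
  obtain ⟨c, ps⟩ := g
  cases c with
  | none => simp [pvEntry, pvRaw, pv_none_para ps "", String.empty_append]
  | some c =>
    cases ps with
    | nil => simp [pvRaw] at h2
    | cons q rest => simp [pvEntry, pvRaw, pv_some_para q rest]

theorem pv_allSome_step (gs : List (Option String × List String)) (p : String)
    (h1 : gs ≠ []) (h2 : ∀ g ∈ gs, g.1.isSome) :
    pvStepB gs p ≠ [] ∧ ∀ g ∈ pvStepB gs p, g.1.isSome := by
  cases hc : pvCode? p with
  | some c =>
    cases gs with
    | nil => exact absurd rfl h1
    | cons a rest =>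
      refine ⟨by simp [pvStepB, hc], ?_⟩
      intro g hg
      simp only [pvStepB, hc] at hg
      rcases List.mem_append.mp hg with h | h
      · exact h2 g h
      · simp at h; subst h; simp
  | none =>
    rw [pvStepB_none _ _ hc h1]
    rcases pv_concat_cases gs with rfl | ⟨l, g, rfl⟩
    · exact absurd rfl h1
    · rw [pvAppendLast_concat]
      refine ⟨by simp, ?_⟩
      intro g' hg'
      rcases List.mem_append.mp hg' with h | h
      · exact h2 g' (by simp [h])
      · simp at h; subst h
        simpa using h2 g (by simp)

theorem pv_allSome_fold (xs : List String) (gs : List (Option String × List String))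
    (h1 : gs ≠ []) (h2 : ∀ g ∈ gs, g.1.isSome) :
    xs.foldl pvStepB gs ≠ [] ∧ ∀ g ∈ xs.foldl pvStepB gs, g.1.isSome := by
  induction xs generalizing gs with
  | nil => exact ⟨h1, h2⟩
  | cons p xs ih =>
    obtain ⟨k1, k2⟩ := pv_allSome_step gs p h1 h2
    exact ih _ k1 k2

theorem pv_codesOf_allSome (gs : List (Option String × List String))
    (h : ∀ g ∈ gs, g.1.isSome) :
    pvCodesOf gs = gs.map (fun g => g.1.getD "") := by
  induction gs with
  | nil => rfl
  | cons g rest ih =>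
    obtain ⟨v, hv⟩ := Option.isSome_iff_exists.mp (h g (by simp))
    simp only [pvCodesOf, List.filterMap_cons, hv, Option.getD_some, List.map_cons]
    exact congrArg _ (ih fun g' hg' => h g' (by simp [hg']))

theorem pv_merged_shape (gs : List (Option String × List String)) (h : gs ≠ []) :
    pvMergedOf gs ++ [pvCurrOf gs ++ "."] = gs.map (fun g => pvRaw g ++ ".") := by
  rcases pv_concat_cases gs with rfl | ⟨l, g, rfl⟩
  · exact absurd rfl h
  · simp [pvMergedOf, pvCurrOf]

theorem pv_range_map (gs : List (Option String × List String))
    (f h : (Option String × List String) → String) :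
    (List.range gs.length).map (fun i =>
        [("inid_code", (gs.map f).getD i ""), ("paragraph", (gs.map h).getD i "")])
      = gs.map (fun g => [("inid_code", f g), ("paragraph", h g)]) := by
  apply List.ext_getElem
  · simp
  · intro i h1 h2
    have hi : i < gs.length := by simpa using h2
    simp [List.getD_eq_getElem?_getD, List.getElem?_eq_getElem hi]

theorem pv_isCode_none (p : String) (h : pvIsCode p = false) : pvCode? p = none := by
  simp only [pvIsCode, Bool.or_eq_false_iff] at h
  obtain ⟨ha, hb⟩ := h
  simp at ha hb
  simp [pvCode?, ha, hb]

theorem pv_nocode_fold_aux (xs : List String) (l : List String)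
    (h : ∀ p ∈ xs, pvCode? p = none) :
    xs.foldl pvStepB [(none, l)] = [(none, l ++ xs)] := by
  induction xs generalizing l with
  | nil => simp
  | cons p xs ih =>
    have hp : pvCode? p = none := h p (by simp)
    show xs.foldl pvStepB (pvStepB [(none, l)] p) = _
    have : pvStepB [(none, l)] p = [(none, l ++ [p])] := by
      simp [pvStepB, hp, pvAppendLast]
    rw [this, ih _ (fun q hq => h q (by simp [hq]))]
    simp

theorem pv_nocode_fold (xs : List String) (h : ∀ p ∈ xs, pvCode? p = none)
    (hx : xs ≠ []) : xs.foldl pvStepB [] = [(none, xs)] := by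
  cases xs with
  | nil => exact absurd rfl hx
  | cons p rest =>
    show rest.foldl pvStepB (pvStepB [] p) = _
    have h0 : pvStepB [] p = [(none, [p])] := by simp [pvStepB, h p (by simp)]
    rw [h0, pv_nocode_fold_aux rest [p] (fun q hq => h q (by simp [hq]))]
    simp

-- ===== VERDICT (by name: the statement is the Claim_ definition above) =====
theorem find_inid_code_and_merge_spec : Claim_equal_find_inid_code_and_merge := by
  intro tt _ hpre
  unfold Spec_find_inid_code_and_merge
  by_cases htt : tt = []
  · subst htt; decide
  obtain ⟨hst, hne⟩ := pvRel_fold tt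
  unfold find_inid_code_and_merge find_inid_code_and_merge_alt
  rw [hst]
  rcases hpre with hall | hhead
  · -- no inid codes anywhere: a single code-less paragraph
    have hnone : ∀ p ∈ tt, pvCode? p = none := fun p hp => pv_isCode_none p (hall p hp)
    have hfold : tt.foldl pvStepB [] = [(none, tt)] := pv_nocode_fold tt hnone htt
    rw [hfold] at hne ⊢
    have hr : pvRaw (none, tt) ≠ "" := hne _ (by simp)
    simp [pvCodesOf, pvMergedOf, pvCurrOf, pvEntry_eq _ hr, List.range_succ]
  · -- first piece carries a code: every group carries a code
    obtain ⟨p, rest, rfl⟩ : ∃ p rest, tt = p :: rest := by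
      cases tt with
      | nil => exact absurd rfl htt
      | cons a b => exact ⟨a, b, rfl⟩
    have hic : pvIsCode p = true := by simpa using hhead
    obtain ⟨c, hc⟩ : ∃ c, pvCode? p = some c := by
      simp only [pvIsCode, Bool.or_eq_true] at hic
      rcases hic with h | h
      · simp at h
        exact ⟨"60", by simp [pvCode?, h]⟩
      · simp at h
        by_cases h60 : PySem.Chars.startswith p.toList ['6', '0'] = true
        · exact ⟨"60", by simp [pvCode?, h60]⟩
        · exact ⟨"62", by simp [pvCode?, h60, h]⟩
    have hstep : pvStepB [] p = [(some c, [p])] := by simp [pvStepB, hc]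
    have hfold : (p :: rest).foldl pvStepB [] = rest.foldl pvStepB [(some c, [p])] := by
      rw [List.foldl_cons, hstep]
    rw [hfold] at hne ⊢
    obtain ⟨hgne, hgsome⟩ := pv_allSome_fold rest [(some c, [p])] (by simp) (by simp)
    generalize hg : rest.foldl pvStepB [(some c, [p])] = gs at *
    have hcl : pvCodesOf gs = gs.map (fun g => g.1.getD "") := pv_codesOf_allSome gs hgsome
    have hml : pvMergedOf gs ++ [pvCurrOf gs ++ "."] = gs.map (fun g => pvRaw g ++ ".") :=
      pv_merged_shape gs hgne
    simp only [hml, hcl]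
    rw [if_neg (by simp [hgne] : ¬((gs.map (fun g => g.1.getD "")).length = 0 ∧
        (gs.map (fun g => pvRaw g ++ ".")).length = 1))]
    rw [if_pos (by simp)]
    rw [if_neg hgne]
    simp only [List.length_map]
    rw [pv_range_map gs (fun g => g.1.getD "") (fun g => pvRaw g ++ ".")]
    exact List.map_congr_left (fun g hgm => (pvEntry_eq g (hne g hgm)).symm)
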